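-- pv_equiv track=rewrite | github.com/pypi-data/pypi-mirror-399 | packages/remarkbox/remarkbox-1.0.5.tar.gz/remarkbox-1.0.5/remarkbox/models/node.py | flatten_graph
-- ===== SOURCE A (Python) =====
-- from collections import (
--     OrderedDict,
--     deque,
-- )
--
-- def flatten_graph(node_id, graph, include_given_node_id=False):
--     """
--     Given a node_id and graph (or tree),
--     return a list of every descendant node_id, depth first order.
--     """
--     flat_graph = []
--
--     to_crawl = deque([node_id])
--
--     while to_crawl:
--         current_id = to_crawl.pop()
--
--         flat_graph.append(current_id)
--
--         children_ids = graph[current_id]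
--
--         # reverse so that we extend the queue in the expected order.
--         children_ids.reverse()
--
--         to_crawl.extend(children_ids)
--
--     if include_given_node_id:
--         return flat_graph
--     return flat_graph[1:]
-- ===== SOURCE B (Python) =====
-- def flatten_graph(node_id, graph, include_given_node_id=False):
--     """
--     Given a node_id and graph (or tree),
--     return a list of every descendant node_id, depth first order.
--
--     Iterative preorder DFS over an explicit stack of pending child lists.
--     Unlike A, this does NOT mutate graph (A reverses each visited node's
--     child list in place); the equivalence claimed is about the return value.
--     """
--     out = [node_id]
--     stack = [graph[node_id]]
--     while stack:
--         top = stack[-1]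
--         if not top:
--             stack.pop()
--             continue
--         c, rest = top[0], top[1:]
--         stack[-1] = rest
--         out.append(c)
--         stack.append(graph[c])
--     return out if include_given_node_id else out[1:]
-- ===== Notes on version B (the rewrite author's own statement) =====
-- stated objective: alternative
-- what changed: Replaces A's deque of node ids with in-place reversal of each visited node's child list by a non-mutating preorder DFS over an explicit stack of pending child lists; Pre_ restricts to well-formed trees (unique keys, every child a key, no id a child twice, root not a child), excluding graphs where A raises KeyError or loops forever and graphs with node re-visits, on which A's output order is an accident of its in-place reversal.
-- outside the precondition, e.g. on flatten_graph(0, {0: [1, 1], 1: []}, False): A returns [1, 1], B returns [1, 1]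
import Mathlib
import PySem

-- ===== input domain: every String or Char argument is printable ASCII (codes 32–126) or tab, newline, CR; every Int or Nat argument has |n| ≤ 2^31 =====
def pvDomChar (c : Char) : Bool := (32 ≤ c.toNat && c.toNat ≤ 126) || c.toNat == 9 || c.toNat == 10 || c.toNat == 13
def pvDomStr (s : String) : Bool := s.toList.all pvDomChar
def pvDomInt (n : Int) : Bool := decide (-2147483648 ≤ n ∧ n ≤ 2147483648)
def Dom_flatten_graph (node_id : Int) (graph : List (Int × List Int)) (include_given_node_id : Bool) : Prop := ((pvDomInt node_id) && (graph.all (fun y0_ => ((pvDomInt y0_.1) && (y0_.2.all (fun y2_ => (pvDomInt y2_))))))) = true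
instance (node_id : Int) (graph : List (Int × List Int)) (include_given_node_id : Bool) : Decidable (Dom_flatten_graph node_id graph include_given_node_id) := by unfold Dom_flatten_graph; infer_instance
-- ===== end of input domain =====

-- B replaces A's deque + in-place child-list reversal by a non-mutating preorder DFS over a stack
-- of pending child lists (alternative decomposition); A mutates `graph` in place (reverses each
-- visited node's child list), B does not — the equivalence proved is about the RETURN value.

-- ===== PORT A =====
-- the while loop; the deque is stored right-end-first (head = the end `pop()` takes from),
-- so `pop()` is taking the head and `extend(children_ids)` is prepending children_ids.reverse.
def flattenGraphLoopA : Nat → List Int → List Int → PySem.Dict Int (List Int) → List Int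
  | 0, flat, _, _ => flat
  | _ + 1, flat, [], _ => flat                       -- while to_crawl: loop ends
  | f + 1, flat, current_id :: rest, g =>
    let flat' := flat ++ [current_id]                -- flat_graph.append(current_id)
    match g.get? current_id with
    | none => flat'                                  -- graph[current_id] raises KeyError (excluded by Pre_)
    | some children_ids =>
      let rev := children_ids.reverse                -- children_ids.reverse()  (in place, so:)
      flattenGraphLoopA f flat' (rev.reverse ++ rest) (g.insert current_id rev)
                                                     -- to_crawl.extend(rev) on the reversed deque

def flatten_graph (node_id : Int) (graph : List (Int × List Int)) (include_given_node_id : Bool) : List Int :=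
  -- fuel: under Pre_ each child occurrence is pushed at most once, so 1 + Σ|children| iterations suffice
  let flat_graph := flattenGraphLoopA (1 + (graph.map (fun p => p.2.length)).sum) [] [node_id] (PySem.Dict.mk graph)
  if include_given_node_id then flat_graph else flat_graph.drop 1   -- flat_graph[1:]

-- ===== PORT B =====
-- the while loop of Source B; stack is stored top-first (head = stack[-1])
def flattenGraphLoopB : Nat → List Int → List (List Int) → PySem.Dict Int (List Int) → List Int
  | 0, out, _, _ => out
  | _ + 1, out, [], _ => out                         -- while stack: loop ends
  | f + 1, out, [] :: stack, g => flattenGraphLoopB f out stack g   -- empty top: stack.pop(); continue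
  | f + 1, out, (c :: rest) :: stack, g =>
    match g.get? c with
    | none => out ++ [c]                             -- graph[c] raises KeyError (excluded by Pre_)
    | some ccs => flattenGraphLoopB f (out ++ [c]) (ccs :: rest :: stack) g
                                                     -- stack[-1] = rest; out.append(c); stack.append(graph[c])

def flatten_graph_alt (node_id : Int) (graph : List (Int × List Int)) (include_given_node_id : Bool) : List Int :=
  match (PySem.Dict.mk graph).get? node_id with
  | none => []                                       -- graph[node_id] raises KeyError (excluded by Pre_)
  | some cs0 =>
    -- fuel: each iteration pops a frame or consumes a child; 2·Σ|children| + 1 iterations suffice under Pre_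
    let out := flattenGraphLoopB (2 * (graph.map (fun p => p.2.length)).sum + 1) [node_id] [cs0] (PySem.Dict.mk graph)
    if include_given_node_id then out else out.drop 1

-- ===== PRECONDITION & SPEC =====
-- the set of node ids reachable from node_id (iterated successor closure; fixpoint after
-- enough rounds), and the graph entries whose key is reachable — what A actually touches
def pvChildren (g : List (Int × List Int)) (k : Int) : List Int := ((PySem.Dict.mk g).get? k).getD []

def pvStep (g : List (Int × List Int)) (S : List Int) : List Int :=
  PySem.Set.update S (S.flatMap (pvChildren g))

def pvReach (g : List (Int × List Int)) (node_id : Int) : List Int :=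
  (pvStep g)^[(g.flatMap Prod.snd).length + 1] [node_id]

def pvRel (g : List (Int × List Int)) (node_id : Int) : List (Int × List Int) :=
  g.filter (fun p => (pvReach g node_id).contains p.1)

-- Pre_ = inputs on which the crawled part of the graph is a well-formed tree: dict-like unique
-- keys, every reachable id a key, no reachable id a child twice, node_id never a child.  This
-- excludes (a) inputs where A raises KeyError or loops forever (missing reachable keys / cycles),
-- (b) duplicate-key association lists (a Python dict cannot hold them), and (c) graphs that
-- re-visit a node, on which A's output order is an accident of its in-place reversal of child
-- lists and B's plain preorder is as defensible.
def Pre_flatten_graph (node_id : Int) (graph : List (Int × List Int)) (include_given_node_id : Bool) : Prop :=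
  (graph.map Prod.fst).Nodup ∧
  (∀ c ∈ pvReach graph node_id, ((PySem.Dict.mk graph).get? c).isSome = true) ∧
  ((pvRel graph node_id).flatMap Prod.snd).Nodup ∧
  node_id ∉ (pvRel graph node_id).flatMap Prod.snd

instance (node_id : Int) (graph : List (Int × List Int)) (include_given_node_id : Bool) : Decidable (Pre_flatten_graph node_id graph include_given_node_id) := by
  unfold Pre_flatten_graph; infer_instance

def pvWitness_flatten_graph : Int × (List (Int × List Int)) × Bool := (0, [(0, [1, 2]), (1, []), (2, [])], true)

def Spec_flatten_graph (node_id : Int) (graph : List (Int × List Int)) (include_given_node_id : Bool) (out : List Int) : Prop := out = flatten_graph_alt node_id graph include_given_node_id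
instance (node_id : Int) (graph : List (Int × List Int)) (include_given_node_id : Bool) (out : List Int) : Decidable (Spec_flatten_graph node_id graph include_given_node_id out) := by unfold Spec_flatten_graph; infer_instance

-- ===== CLAIM (what is proved, stated in full; the proofs are below) =====
def Claim_equal_flatten_graph : Prop := ∀ (node_id : Int) (graph : List (Int × List Int)) (include_given_node_id : Bool), Dom_flatten_graph node_id graph include_given_node_id → Pre_flatten_graph node_id graph include_given_node_id → Spec_flatten_graph node_id graph include_given_node_id (flatten_graph node_id graph include_given_node_id)

-- ===== LEMMAS AND PROOFS =====

-- the reachable set is monotone under pvStep and a closed fixpoint after enough rounds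
lemma subset_pvStep (g : List (Int × List Int)) (S : List Int) : S ⊆ pvStep g S := by
  intro d hd
  exact (PySem.Set.mem_update _ _ _).mpr (Or.inl hd)

lemma nodup_pvStep (g : List (Int × List Int)) (S : List Int) (h : S.Nodup) : (pvStep g S).Nodup :=
  PySem.Set.nodup_update S _ h

lemma pvChildren_sub (g : List (Int × List Int)) (k d : Int) (hd : d ∈ pvChildren g k) :
    d ∈ g.flatMap Prod.snd := by
  unfold pvChildren at hd
  cases hg : (PySem.Dict.mk g).get? k with
  | none => rw [hg] at hd; simp at hd
  | some cs =>
    rw [hg] at hd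
    exact List.mem_flatMap.mpr ⟨(k, cs), PySem.Dict.mem_items_of_get?_eq_some _ hg, hd⟩

lemma pvStep_sub (g : List (Int × List Int)) (nid : Int) (S : List Int)
    (hS : S ⊆ nid :: g.flatMap Prod.snd) : pvStep g S ⊆ nid :: g.flatMap Prod.snd := by
  intro d hd
  rcases (PySem.Set.mem_update _ _ _).mp hd with hd | hd
  · exact hS hd
  · obtain ⟨k, _, hdk⟩ := List.mem_flatMap.mp hd
    exact List.mem_cons_of_mem _ (pvChildren_sub g k d hdk)

lemma pvStep_ne_length (g : List (Int × List Int)) (S : List Int) (h : pvStep g S ≠ S) :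
    S.length < (pvStep g S).length := by
  unfold pvStep at *
  rw [PySem.Set.update_eq_append_filter] at *
  rcases Nat.lt_or_ge S.length (S ++ _).length with hlt | hge
  · exact hlt
  · exfalso
    apply h
    have : ((PySem.Set.ofList (S.flatMap (pvChildren g))).filter
        (fun y => !(PySem.Set.contains S y))).length = 0 := by
      rw [List.length_append] at hge; omega
    rw [List.length_eq_zero_iff.mp this, List.append_nil]

lemma pvStep_fix_closed (g : List (Int × List Int)) (S : List Int) (h : pvStep g S = S) :
    ∀ k ∈ S, ∀ d ∈ pvChildren g k, d ∈ S := by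
  intro k hk d hd
  have : d ∈ pvStep g S := (PySem.Set.mem_update _ _ _).mpr (Or.inr (List.mem_flatMap.mpr ⟨k, hk, hd⟩))
  rwa [h] at this

lemma iterate_fixed (g : List (Int × List Int)) (S : List Int) (h : pvStep g S = S) :
    ∀ n, (pvStep g)^[n] S = S := by
  intro n
  induction n with
  | zero => rfl
  | succ n ih => rw [Function.iterate_succ_apply, h, ih]

lemma pvStep_iterate_fix (g : List (Int × List Int)) (nid : Int) :
    ∀ (n : Nat) (S : List Int), S.Nodup → S ⊆ nid :: g.flatMap Prod.snd →
    (nid :: g.flatMap Prod.snd).length < S.length + n →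
    pvStep g ((pvStep g)^[n] S) = (pvStep g)^[n] S := by
  intro n
  induction n with
  | zero =>
    intro S hN hS hlen
    have := (List.subperm_of_subset hN hS).length_le
    omega
  | succ n ih =>
    intro S hN hS hlen
    by_cases hfix : pvStep g S = S
    · rw [iterate_fixed g S hfix]
      exact hfix
    · rw [Function.iterate_succ_apply]
      have hlt := pvStep_ne_length g S hfix
      exact ih (pvStep g S) (nodup_pvStep g S hN) (pvStep_sub g nid S hS) (by omega)

lemma pvReach_fix (g : List (Int × List Int)) (nid : Int) :
    pvStep g (pvReach g nid) = pvReach g nid := by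
  apply pvStep_iterate_fix g nid _ [nid] (by simp) (by intro d hd; simp at hd; simp [hd]) (by simp)

lemma pvReach_nid (g : List (Int × List Int)) (nid : Int) : nid ∈ pvReach g nid := by
  unfold pvReach
  generalize (g.flatMap Prod.snd).length + 1 = n
  induction n with
  | zero => simp
  | succ n ih =>
    rw [Function.iterate_succ_apply']
    exact subset_pvStep g _ ih

lemma pvReach_closed (g : List (Int × List Int)) (nid : Int) :
    ∀ k ∈ pvReach g nid, ∀ cs, (PySem.Dict.mk g).get? k = some cs → ∀ d ∈ cs, d ∈ pvReach g nid := by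
  intro k hk cs hg d hd
  apply pvStep_fix_closed g _ (pvReach_fix g nid) k hk
  unfold pvChildren
  rw [hg]
  exact hd

-- remaining cost: children still to be pushed from not-yet-visited entries
def remCost (g : List (Int × List Int)) (visited : List Int) : Nat :=
  ((g.filter (fun p => !(visited.contains p.1))).map (fun p => p.2.length)).sum

lemma remCost_nil (g : List (Int × List Int)) : remCost g [] = (g.map (fun p => p.2.length)).sum := by
  simp [remCost]

lemma remCost_congr (t : List (Int × List Int)) (c : Int) (v : List Int)
    (h : ∀ p ∈ t, p.1 ≠ c) : remCost t (c :: v) = remCost t v := by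
  unfold remCost
  rw [List.filter_congr]
  intro p hp
  simp [h p hp]

lemma remCost_visit (g : List (Int × List Int)) (hk : (g.map Prod.fst).Nodup)
    (c : Int) (cs : List Int) (v : List Int) (hmem : (c, cs) ∈ g) (hcv : c ∉ v) :
    remCost g (c :: v) + cs.length = remCost g v := by
  induction g with
  | nil => simp at hmem
  | cons p t ih =>
    simp only [List.map_cons, List.nodup_cons] at hk
    rcases List.mem_cons.mp hmem with rfl | hmt
    · have ht : remCost t (c :: v) = remCost t v := by
        apply remCost_congr
        intro q hq hqc
        exact hk.1 (List.mem_map.mpr ⟨q, hq, hqc⟩)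
      simp only [remCost] at ht ⊢
      simp [hcv] at ht ⊢
      omega
    · have hpc : p.1 ≠ c := by
        rintro rfl
        exact hk.1 (List.mem_map.mpr ⟨(p.1, cs), hmt, rfl⟩)
      have ht := ih hk.2 hmt
      simp only [remCost] at ht ⊢
      by_cases hpv : p.1 ∈ v
      · simp [hpv, hpc] at ht ⊢
        omega
      · simp [hpv, hpc] at ht ⊢
        omega

lemma loopB_drain (stack : List (List Int)) : ∀ (m : Nat) (flat : List Int) (g : PySem.Dict Int (List Int)),
    stack.flatten = [] → flattenGraphLoopB (m + stack.length) flat stack g = flat := by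
  induction stack with
  | nil => intro m flat g _; cases m <;> rfl
  | cons frame s ih =>
    intro m flat g h
    simp only [List.flatten_cons, List.append_eq_nil_iff] at h
    obtain ⟨rfl, hs⟩ := h
    rw [show m + ([] :: s).length = (m + s.length) + 1 by simp; omega]
    show flattenGraphLoopB (m + s.length) flat s g = flat
    exact ih m flat g hs


-- simulation: A's crawl deque is the flattening of B's stack of frames
lemma sim (nid : Int) (g0 : List (Int × List Int))
    (hKeys : (g0.map Prod.fst).Nodup)
    (hChildR : ∀ c ∈ pvReach g0 nid, ((PySem.Dict.mk g0).get? c).isSome = true)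
    (hCN : ((pvRel g0 nid).flatMap Prod.snd).Nodup)
    (hRoot : nid ∉ (pvRel g0 nid).flatMap Prod.snd) :
    ∀ (fA : Nat) (stack : List (List Int)), ∀ (visited flat : List Int) (g : PySem.Dict Int (List Int)),
    (∀ k, k ∉ visited → g.get? k = (PySem.Dict.mk g0).get? k) →
    (∀ c ∈ stack.flatten, c ∈ pvReach g0 nid) →
    stack.flatten.Nodup →
    (∀ c ∈ stack.flatten, c ∉ visited) →
    (∀ d, d ∈ visited ∨ d ∈ stack.flatten → d = nid ∨ ∃ p, p ∈ pvRel g0 nid ∧ p.1 ∈ visited ∧ d ∈ p.2) →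
    stack.flatten.length + remCost g0 visited ≤ fA →
    flattenGraphLoopA fA flat stack.flatten g
      = flattenGraphLoopB (2 * fA + stack.length) flat stack (PySem.Dict.mk g0) := by
  have hFacts := List.nodup_flatMap.mp hCN
  have hDisjEnt : ∀ c cs, (c, cs) ∈ pvRel g0 nid → ∀ p ∈ pvRel g0 nid, p.1 ≠ c → ∀ d, d ∈ p.2 → d ∈ cs → False := by
    intro c cs hentry p hp hne d hdp hdc
    have hpq : p ≠ (c, cs) := by
      intro h; exact hne (by rw [h])
    have hdisj := List.Pairwise.forall
      (fun (a b : Int × List Int) (h : Function.onFun List.Disjoint Prod.snd a b) => h.symm)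
      hFacts.2 hp hentry hpq
    exact hdisj hdp hdc
  intro fA
  induction fA with
  | zero =>
    intro stack visited flat g hgEq hFlatR hND hDisj hOrig hFuel
    have h0 : stack.flatten = [] := List.eq_nil_of_length_eq_zero (by omega)
    rw [h0, show 2 * 0 + stack.length = 0 + stack.length by omega,
        loopB_drain stack 0 flat _ h0]
    rfl
  | succ fA ih =>
    intro stack
    induction stack with
    | nil =>
      intro visited flat g hgEq hFlatR hND hDisj hOrig hFuel
      rw [show 2 * (fA + 1) + ([] : List (List Int)).length = (2 * fA + 1) + 1 by simp; omega]
      rfl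
    | cons frame s ihs =>
      intro visited flat g hgEq hFlatR hND hDisj hOrig hFuel
      cases frame with
      | nil =>
        rw [show 2 * (fA + 1) + (([] : List Int) :: s).length = (2 * (fA + 1) + s.length) + 1 by simp; omega]
        show flattenGraphLoopA (fA + 1) flat (([] : List Int) :: s).flatten g
          = flattenGraphLoopB (2 * (fA + 1) + s.length) flat s (PySem.Dict.mk g0)
        simp only [List.flatten_cons, List.nil_append]
        simp only [List.flatten_cons, List.nil_append] at hFlatR hND hDisj hOrig hFuel
        exact ihs visited flat g hgEq hFlatR hND hDisj hOrig hFuel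
      | cons c rest =>
        have hcmem : c ∈ ((c :: rest) :: s).flatten := by simp
        have hcR : c ∈ pvReach g0 nid := hFlatR c hcmem
        obtain ⟨cs, hg0c⟩ : ∃ cs, (PySem.Dict.mk g0).get? c = some cs :=
          Option.isSome_iff_exists.mp (hChildR c hcR)
        have hcv : c ∉ visited := hDisj c hcmem
        have hgc : g.get? c = some cs := by rw [hgEq c hcv]; exact hg0c
        have hentry : (c, cs) ∈ g0 :=
          (PySem.Dict.get?_eq_some_iff_mem_items (PySem.Dict.mk g0) c cs hKeys).mp hg0c
        have hentryPP : (c, cs) ∈ pvRel g0 nid :=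
          List.mem_filter.mpr ⟨hentry, by simpa using hcR⟩
        have hCsub : ∀ d ∈ cs, d ∈ (pvRel g0 nid).flatMap Prod.snd :=
          fun d hd => List.mem_flatMap.mpr ⟨(c, cs), hentryPP, hd⟩
        have hcsR : ∀ d ∈ cs, d ∈ pvReach g0 nid :=
          fun d hd => pvReach_closed g0 nid c hcR cs hg0c d hd
        have hcsN : cs.Nodup := hFacts.1 (c, cs) hentryPP
        -- flatten of the old stack
        have hflat : ((c :: rest) :: s).flatten = c :: (rest ++ s.flatten) := by simp
        rw [hflat] at hFlatR hND hDisj hOrig hFuel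
        have hcRst : c ∉ rest ++ s.flatten := (List.nodup_cons.mp hND).1
        have hRN : (rest ++ s.flatten).Nodup := (List.nodup_cons.mp hND).2
        -- children are globally fresh
        have hfresh : ∀ d ∈ cs, d ∉ visited ∧ d ∉ (rest ++ s.flatten) ∧ d ≠ c := by
          intro d hd
          have hdflat : d ∈ (pvRel g0 nid).flatMap Prod.snd := hCsub d hd
          have hdnid : d ≠ nid := fun h => hRoot (h ▸ hdflat)
          have noOld : ∀ _ : d ∈ visited ∨ d ∈ c :: (rest ++ s.flatten), False := by
            intro hold
            rcases hOrig d hold with h | ⟨p, hp, hpv, hdp⟩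
            · exact hdnid h
            · have hne : p.1 ≠ c := fun h => hcv (h ▸ hpv)
              exact hDisjEnt c cs hentryPP p hp hne d hdp hd
          refine ⟨fun h => noOld (Or.inl h), fun h => noOld (Or.inr (by simp [h])), ?_⟩
          rintro rfl
          rcases hOrig d (Or.inr (by simp)) with h | ⟨p, hp, hpv, hdp⟩
          · exact hRoot (h ▸ hdflat)
          · have hne : p.1 ≠ d := fun h => hcv (h ▸ hpv)
            exact hDisjEnt d cs hentryPP p hp hne d hdp hd
        -- unfold one step of A
        rw [hflat]
        show flattenGraphLoopA (fA + 1) flat (c :: (rest ++ s.flatten)) g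
          = flattenGraphLoopB (2 * (fA + 1) + ((c :: rest) :: s).length) flat ((c :: rest) :: s) (PySem.Dict.mk g0)
        rw [show 2 * (fA + 1) + ((c :: rest) :: s).length = (2 * fA + (cs :: rest :: s).length) + 1 by simp; omega]
        show (match g.get? c with
              | none => flat ++ [c]
              | some children_ids =>
                flattenGraphLoopA fA (flat ++ [c]) (children_ids.reverse.reverse ++ (rest ++ s.flatten)) (g.insert c children_ids.reverse))
          = (match (PySem.Dict.mk g0).get? c with
              | none => flat ++ [c]
              | some ccs => flattenGraphLoopB (2 * fA + (cs :: rest :: s).length) (flat ++ [c]) (ccs :: rest :: s) (PySem.Dict.mk g0))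
        rw [hgc, hg0c]
        simp only [List.reverse_reverse]
        have hstep : (cs :: rest :: s).flatten = cs ++ (rest ++ s.flatten) := by simp
        have goal := ih (cs :: rest :: s) (c :: visited) (flat ++ [c]) (g.insert c cs.reverse)
          (by -- hgEq'
            intro k hk
            simp only [List.mem_cons, not_or] at hk
            rw [PySem.Dict.get?_insert_of_ne _ _ hk.1]
            exact hgEq k hk.2)
          (by -- hFlatR'
            intro d hd
            rw [hstep] at hd
            rcases List.mem_append.mp hd with hd | hd
            · exact hcsR d hd
            · exact hFlatR d (List.mem_cons_of_mem _ hd))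
          (by -- Nodup'
            rw [hstep]
            exact List.Nodup.append hcsN hRN (fun d hd hd' => (hfresh d hd).2.1 hd'))
          (by -- hDisj'
            intro d hd
            rw [hstep] at hd
            simp only [List.mem_cons, not_or]
            rcases List.mem_append.mp hd with hd | hd
            · exact ⟨(hfresh d hd).2.2, (hfresh d hd).1⟩
            · exact ⟨fun h => hcRst (h ▸ hd), hDisj d (List.mem_cons_of_mem _ hd)⟩)
          (by -- hOrig'
            intro d hd
            rw [hstep] at hd
            have mono : d = nid ∨ (∃ p, p ∈ pvRel g0 nid ∧ p.1 ∈ visited ∧ d ∈ p.2) →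
                d = nid ∨ ∃ p, p ∈ pvRel g0 nid ∧ p.1 ∈ c :: visited ∧ d ∈ p.2 := by
              rintro (h | ⟨p, hp, hpv, hdp⟩)
              · exact Or.inl h
              · exact Or.inr ⟨p, hp, List.mem_cons_of_mem _ hpv, hdp⟩
            rcases hd with hd | hd
            · rcases List.mem_cons.mp hd with rfl | hdv
              · exact mono (hOrig d (Or.inr (List.mem_cons_self)))
              · exact mono (hOrig d (Or.inl hdv))
            · rcases List.mem_append.mp hd with hd | hd
              · exact Or.inr ⟨(c, cs), hentryPP, List.mem_cons_self, hd⟩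
              · exact mono (hOrig d (Or.inr (List.mem_cons_of_mem _ hd))))
          (by -- fuel
            rw [hstep]
            have hv := remCost_visit g0 hKeys c cs visited hentry hcv
            simp only [List.length_cons, List.length_append] at hFuel ⊢
            omega)
        rw [hstep] at goal
        exact goal

-- ===== VERDICT (by name: the statement is the Claim_ definition above) =====
theorem flatten_graph_spec : Claim_equal_flatten_graph := by
  intro nid g inc _ hPre
  obtain ⟨hKeys, hChildR, hCN, hRoot⟩ := hPre
  unfold Spec_flatten_graph flatten_graph flatten_graph_alt
  have hnidR : nid ∈ pvReach g nid := pvReach_nid g nid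
  obtain ⟨cs0, hg⟩ := Option.isSome_iff_exists.mp (hChildR nid hnidR)
  have hentry : (nid, cs0) ∈ g :=
    (PySem.Dict.get?_eq_some_iff_mem_items (PySem.Dict.mk g) nid cs0 hKeys).mp hg
  have hentryPP : (nid, cs0) ∈ pvRel g nid :=
    List.mem_filter.mpr ⟨hentry, by simpa using hnidR⟩
  have hA1 : flattenGraphLoopA (1 + (g.map (fun p => p.2.length)).sum) [] [nid] (PySem.Dict.mk g)
      = flattenGraphLoopA ((g.map (fun p => p.2.length)).sum) [nid] cs0
          ((PySem.Dict.mk g).insert nid cs0.reverse) := by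
    rw [show 1 + (g.map (fun p => p.2.length)).sum = (g.map (fun p => p.2.length)).sum + 1 by omega]
    simp only [flattenGraphLoopA, hg, List.nil_append, List.reverse_reverse, List.append_nil]
  have hsim := sim nid g hKeys hChildR hCN hRoot ((g.map (fun p => p.2.length)).sum)
    [cs0] [nid] [nid] ((PySem.Dict.mk g).insert nid cs0.reverse)
    (by
      intro k hk
      simp only [List.mem_singleton] at hk
      exact PySem.Dict.get?_insert_of_ne _ _ hk)
    (by
      intro d hd
      simp only [List.flatten_cons, List.flatten_nil, List.append_nil] at hd
      exact pvReach_closed g nid nid hnidR cs0 hg d hd)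
    (by
      simp only [List.flatten_cons, List.flatten_nil, List.append_nil]
      exact (List.nodup_flatMap.mp hCN).1 (nid, cs0) hentryPP)
    (by
      intro d hd
      simp only [List.flatten_cons, List.flatten_nil, List.append_nil] at hd
      intro hdn
      rw [List.mem_singleton] at hdn
      subst hdn
      exact hRoot (List.mem_flatMap.mpr ⟨(d, cs0), hentryPP, hd⟩))
    (by
      intro d hd
      simp only [List.flatten_cons, List.flatten_nil, List.append_nil, List.mem_singleton] at hd
      rcases hd with hdn | hd
      · exact Or.inl hdn
      · exact Or.inr ⟨(nid, cs0), hentryPP, List.mem_singleton.mpr rfl, hd⟩)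
    (by
      simp only [List.flatten_cons, List.flatten_nil, List.append_nil]
      have hv := remCost_visit g hKeys nid cs0 [] hentry (by simp)
      have hn := remCost_nil g
      omega)
  simp only [List.flatten_cons, List.flatten_nil, List.append_nil, List.length_cons,
    List.length_nil] at hsim
  rw [hg, hA1, hsim]
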